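-- pv_equiv track=rewrite | github.com/MinKyeom/KMK-DREAM | Programmers/Lv0/A강조하기.py | solution
-- ===== SOURCE A (Python) =====
-- def solution(myString):
--     x=list(myString)
--     for k in range(len(x)):
--         if x[k]=="A" or x[k]=="a":
--             x[k]="A"
--         else:
--             x[k]=x[k].lower()
--     return "".join(x)
-- ===== SOURCE B (Python) =====
-- def solution(myString):
--     return myString.lower().replace('a', 'A')
-- ===== Notes on version B (the rewrite author's own statement) =====
-- stated objective: simpler
-- what changed: Replaces the explicit per-index loop with a per-character branch by two whole-string library passes: str.lower over the whole string followed by one str.replace restoring the target letter to uppercase.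
import Mathlib
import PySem

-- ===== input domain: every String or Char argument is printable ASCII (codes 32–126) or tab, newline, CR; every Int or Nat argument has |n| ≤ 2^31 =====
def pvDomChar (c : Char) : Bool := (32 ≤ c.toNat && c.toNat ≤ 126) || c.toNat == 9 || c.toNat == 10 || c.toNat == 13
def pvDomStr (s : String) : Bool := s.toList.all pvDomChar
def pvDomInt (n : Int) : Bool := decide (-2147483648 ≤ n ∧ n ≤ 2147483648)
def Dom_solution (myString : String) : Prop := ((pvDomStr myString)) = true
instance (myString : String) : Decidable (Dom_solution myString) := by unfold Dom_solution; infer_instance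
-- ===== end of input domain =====

-- B lowercases the whole string then replaces 'a' by 'A' (two whole-string passes) instead of A's
-- per-character branch; same return value, objective: simpler.

-- ===== PORT A =====
-- the loop over range(len(x)) rewriting each position independently, as structural recursion over the chars
def solutionGo : List Char → List Char
  | [] => []
  | c :: t => (if c = 'A' ∨ c = 'a' then 'A' else PySem.Chars.lowerChar c) :: solutionGo t

def solution (myString : String) : String :=
  String.ofList (solutionGo myString.toList)

-- ===== PORT B =====
def solution_alt (myString : String) : String :=
  PySem.Str.replace (PySem.Str.lower myString) "a" "A"

-- ===== PRECONDITION & SPEC =====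
def Spec_solution (myString : String) (out : String) : Prop := out = solution_alt myString
instance (myString : String) (out : String) : Decidable (Spec_solution myString out) := by unfold Spec_solution; infer_instance

-- ===== CLAIM (what is proved, stated in full; the proofs are below) =====
def Claim_equal_solution : Prop := ∀ (myString : String), Dom_solution myString → Spec_solution myString (solution myString)

-- ===== LEMMAS AND PROOFS =====

lemma charOfNat_toNat (n : Nat) (h : n < 55296) : (Char.ofNat n).toNat = n := by
  unfold Char.ofNat
  rw [dif_pos (Or.inl h)]
  simp [Char.ofNatAux, Char.toNat]

-- single-char replace is a pointwise map
lemma replace_go_single (new : List Char) (l acc : List Char) (fuel : Nat) (h : l.length ≤ fuel) :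
    PySem.Chars.replace.go ['a'] new fuel l acc
      = acc.reverse ++ l.flatMap (fun c => if c = 'a' then new else [c]) := by
  induction l generalizing fuel acc with
  | nil => cases fuel <;> simp [PySem.Chars.replace.go]
  | cons c t ih =>
    cases fuel with
    | zero => simp at h
    | succ n =>
      simp only [List.length_cons, Nat.succ_le_succ_iff] at h
      rw [PySem.Chars.replace.go]
      by_cases hc : c = 'a'
      · subst hc
        have hp : List.isPrefixOf ['a'] ('a' :: t) = true := by simp [List.isPrefixOf]
        rw [hp, if_pos rfl]
        simp only [List.length_cons, List.length_nil, List.drop_succ_cons, List.drop_zero]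
        rw [ih _ _ h]
        simp [List.flatMap_cons]
      · have : List.isPrefixOf ['a'] (c :: t) = false := by
          simp [List.isPrefixOf]; intro h'; exact absurd h'.symm hc
        rw [this]
        simp only [Bool.false_eq_true, if_false]
        rw [ih _ _ h]
        simp [List.flatMap_cons, hc]

lemma lowerChar_a_iff (c : Char) : PySem.Chars.lowerChar c = 'a' ↔ (c = 'A' ∨ c = 'a') := by
  unfold PySem.Chars.lowerChar PySem.Chars.isupper
  constructor
  · intro h
    split_ifs at h with hu
    · left
      simp only [Bool.and_eq_true, decide_eq_true_eq, Char.le_def] at hu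
      obtain ⟨h1, h2⟩ := hu
      have hb : c.toNat ≤ 90 := h2
      have hval : c.toNat + 32 = 97 := by
        have := congrArg Char.toNat h
        rwa [charOfNat_toNat _ (by omega)] at this
      have h65 : c.toNat = 65 := by omega
      exact Char.ext (UInt32.toNat_inj.mp h65)
    · right; exact h
  · rintro (rfl | rfl) <;> decide

lemma pointwise (c : Char) :
    (if PySem.Chars.lowerChar c = 'a' then ['A'] else [PySem.Chars.lowerChar c])
      = [if c = 'A' ∨ c = 'a' then 'A' else PySem.Chars.lowerChar c] := by
  by_cases h : c = 'A' ∨ c = 'a'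
  · rw [if_pos ((lowerChar_a_iff c).2 h), if_pos h]
  · rw [if_neg (fun hh => h ((lowerChar_a_iff c).1 hh)), if_neg h]

lemma solutionGo_eq (l : List Char) :
    (l.map PySem.Chars.lowerChar).flatMap (fun c => if c = 'a' then ['A'] else [c]) = solutionGo l := by
  induction l with
  | nil => rfl
  | cons c t ih =>
    simp only [List.map_cons, List.flatMap_cons, solutionGo]
    rw [ih]
    have := pointwise c
    simp only [this]
    rfl

-- ===== VERDICT (by name: the statement is the Claim_ definition above) =====
theorem solution_spec : Claim_equal_solution := by
  intro s _
  unfold Spec_solution solution solution_alt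
  apply String.toList_injective
  simp only [PySem.Str.toList_replace, PySem.Str.toList_lower, String.toList_ofList]
  show solutionGo s.toList
        = PySem.Chars.replace (PySem.Chars.lower s.toList) ("a" : String).toList ("A" : String).toList
  unfold PySem.Chars.replace
  rw [show ("a" : String).toList = ['a'] from rfl, show ("A" : String).toList = ['A'] from rfl]
  simp only [List.isEmpty, Bool.false_eq_true, if_false, reduceIte]
  rw [replace_go_single _ _ _ _ (by simp [PySem.Chars.lower])]
  simpa [PySem.Chars.lower] using (solutionGo_eq s.toList).symm
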